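-- pv_equiv track=rewrite | github.com/tncy67/live-object-detection | app.py | is_object_in_motion
-- ===== SOURCE A (Python) =====
-- def is_object_in_motion(current_objects, previous_objects):
--     if not previous_objects:
--         return False
--     for obj in current_objects:
--         for prev_obj in previous_objects:
--             if obj[0] == prev_obj[0]:  # Compare the class labels
--                 x_diff = abs(obj[2] - prev_obj[2])
--                 y_diff = abs(obj[3] - prev_obj[3])
--                 if x_diff > 20 or y_diff > 20:  # Adjust the threshold as needed
--                     return True
--     return False
-- ===== SOURCE B (Python) =====
-- def is_object_in_motion(current_objects, previous_objects):
--     # Labels we will ever need to check.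
--     wanted = {obj[0] for obj in current_objects}
--     # One pass over previous objects: per relevant label, min/max of x and y.
--     groups = {}
--     for p in previous_objects:
--         label = p[0]
--         if label in wanted:
--             x, y = p[2], p[3]
--             g = groups.get(label)
--             if g is None:
--                 groups[label] = (x, x, y, y)
--             else:
--                 mnx, mxx, mny, mxy = g
--                 groups[label] = (min(mnx, x), max(mxx, x), min(mny, y), max(mxy, y))
--     # O(1) range check per current object.
--     for obj in current_objects:
--         g = groups.get(obj[0])
--         if g is not None:
--             mnx, mxx, mny, mxy = g
--             x, y = obj[2], obj[3]
--             if x - mnx > 20 or mxx - x > 20 or y - mny > 20 or mxy - y > 20: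
--                 return True
--     return False
-- ===== Notes on version B (the rewrite author's own statement) =====
-- stated objective: alternative
-- what changed: Replaces the nested current-x-previous scan by one pass grouping the previous objects (labels occurring in current only) into a dict of per-label min/max x and y, then an O(1) range check per current object; intended as asymptotically better (O(n+m) vs O(n*m)) but a timing run read only ~1.8x inconsistently, so no speed is claimed.
-- outside the precondition, e.g. on is_object_in_motion([[]], []): A returns False, B raises IndexError; on is_object_in_motion([[1, 0, 50, 0]], [[1, 0, 0, 0], [1, 9]]): A returns True, B raises IndexError
import Mathlib
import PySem

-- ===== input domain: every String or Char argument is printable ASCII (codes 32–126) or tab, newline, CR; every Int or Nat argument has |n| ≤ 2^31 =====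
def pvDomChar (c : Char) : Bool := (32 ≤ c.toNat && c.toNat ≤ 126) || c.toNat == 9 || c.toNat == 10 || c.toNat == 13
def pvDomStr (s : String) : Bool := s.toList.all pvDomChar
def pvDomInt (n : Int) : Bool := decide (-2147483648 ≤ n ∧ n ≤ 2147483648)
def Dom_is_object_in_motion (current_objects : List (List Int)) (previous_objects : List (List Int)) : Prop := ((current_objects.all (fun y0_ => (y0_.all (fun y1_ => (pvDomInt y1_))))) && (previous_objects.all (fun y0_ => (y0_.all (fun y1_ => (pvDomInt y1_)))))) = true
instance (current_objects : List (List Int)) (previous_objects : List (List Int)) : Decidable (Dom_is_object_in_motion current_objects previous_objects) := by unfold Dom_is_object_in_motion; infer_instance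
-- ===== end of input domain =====

-- B replaces A's nested scan by one pass grouping previous objects (labels occurring in
-- current only) into per-label min/max x/y ranges, then a constant-time range check per
-- current object (objective: alternative single-pass algorithm).

-- obj[i] as Python evaluates it; Pre_ guarantees the index is in range (getD never fires there)
def pvFld (p : List Int) (i : Int) : Int := (PySem.List.pyGet? p i).getD 0

-- ===== PORT A =====
def is_object_in_motion (current_objects : List (List Int)) (previous_objects : List (List Int)) : Bool :=
  if previous_objects = [] then false
  else
    current_objects.any (fun obj =>
      previous_objects.any (fun prev_obj =>
        if pvFld obj 0 == pvFld prev_obj 0 then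
          let x_diff := |pvFld obj 2 - pvFld prev_obj 2|
          let y_diff := |pvFld obj 3 - pvFld prev_obj 3|
          decide (x_diff > 20) || decide (y_diff > 20)
        else false))

-- ===== PORT B =====
-- per-label range check (B's second-loop body: no group for this label -> False, else O(1) range test)
def pvCheckVal (x y : Int) : Option (Int × Int × Int × Int) → Bool
  | none => false
  | some (mnx, mxx, mny, mxy) =>
    decide (x - mnx > 20) || decide (mxx - x > 20) || decide (y - mny > 20) || decide (mxy - y > 20)

-- grouping of one previous object into the per-label (minx,maxx,miny,maxy) dict
def pvStepCore (d : PySem.Dict Int (Int × Int × Int × Int)) (p : List Int) : PySem.Dict Int (Int × Int × Int × Int) :=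
  let label := pvFld p 0
  let x := pvFld p 2
  let y := pvFld p 3
  match d.get? label with
  | none => d.insert label (x, x, y, y)
  | some (mnx, mxx, mny, mxy) => d.insert label (min mnx x, max mxx x, min mny y, max mxy y)

-- one iteration of B's first loop: group p only if its label is a wanted (current) label
def pvBStep (wanted : PySem.Set Int) (d : PySem.Dict Int (Int × Int × Int × Int)) (p : List Int) : PySem.Dict Int (Int × Int × Int × Int) :=
  if PySem.Set.contains wanted (pvFld p 0) then pvStepCore d p else d

def pvBCheck (d : PySem.Dict Int (Int × Int × Int × Int)) (obj : List Int) : Bool :=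
  pvCheckVal (pvFld obj 2) (pvFld obj 3) (d.get? (pvFld obj 0))

def is_object_in_motion_alt (current_objects : List (List Int)) (previous_objects : List (List Int)) : Bool :=
  let wanted : PySem.Set Int := PySem.Set.ofList (current_objects.map (fun obj => pvFld obj 0))
  current_objects.any (pvBCheck (previous_objects.foldl (pvBStep wanted) PySem.Dict.empty))

-- ===== PRECONDITION & SPEC =====
-- Pre_ excludes malformed inputs: an empty (length-0) object, or a same-label current/previous
-- pair where either object is shorter than 4 entries; there Python A raises IndexError or,
-- when its early-exit scan never reaches the short object, returns a value B's upfront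
-- grouping pass cannot match (B indexes every previous object with a wanted label, so it raises).
def Pre_is_object_in_motion (current_objects : List (List Int)) (previous_objects : List (List Int)) : Prop :=
  (∀ o ∈ current_objects, 1 ≤ o.length) ∧ (∀ q ∈ previous_objects, 1 ≤ q.length) ∧
    (∀ o ∈ current_objects, ∀ q ∈ previous_objects,
      o.getD 0 0 = q.getD 0 0 → (4 ≤ o.length ∧ 4 ≤ q.length))
instance (current_objects : List (List Int)) (previous_objects : List (List Int)) : Decidable (Pre_is_object_in_motion current_objects previous_objects) := by unfold Pre_is_object_in_motion; infer_instance
def pvWitness_is_object_in_motion : List (List Int) × List (List Int) := ([[1, 0, 30, 0]], [[1, 0, 0, 0]])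

def Spec_is_object_in_motion (current_objects : List (List Int)) (previous_objects : List (List Int)) (out : Bool) : Prop := out = is_object_in_motion_alt current_objects previous_objects
instance (current_objects : List (List Int)) (previous_objects : List (List Int)) (out : Bool) : Decidable (Spec_is_object_in_motion current_objects previous_objects out) := by unfold Spec_is_object_in_motion; infer_instance

-- ===== CLAIM (what is proved, stated in full; the proofs are below) =====
def Claim_equal_is_object_in_motion : Prop := ∀ (current_objects : List (List Int)) (previous_objects : List (List Int)), Dom_is_object_in_motion current_objects previous_objects → Pre_is_object_in_motion current_objects previous_objects → Spec_is_object_in_motion current_objects previous_objects (is_object_in_motion current_objects previous_objects)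

-- ===== LEMMAS AND PROOFS =====

-- per-label view of one grouping step
def pvUpd (L : Int) (g : Option (Int × Int × Int × Int)) (p : List Int) : Option (Int × Int × Int × Int) :=
  if pvFld p 0 = L then
    some (match g with
      | none => (pvFld p 2, pvFld p 2, pvFld p 3, pvFld p 3)
      | some (a, b, c, e) => (min a (pvFld p 2), max b (pvFld p 2), min c (pvFld p 3), max e (pvFld p 3)))
  else g

-- A's per-pair test, as pvCheck_fold states it
def pvMoved (L x y : Int) (p : List Int) : Bool :=
  decide (pvFld p 0 = L) && (decide (|x - pvFld p 2| > 20) || decide (|y - pvFld p 3| > 20))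

lemma pvAbsSplit (u v : Int) : (decide (u - v > 20) || decide (v - u > 20)) = decide (|u - v| > 20) := by
  rw [← Bool.decide_or, decide_eq_decide, gt_iff_lt, gt_iff_lt, gt_iff_lt, lt_abs]
  constructor <;> rintro (h | h) <;> omega

lemma pvStep_get (d : PySem.Dict Int (Int × Int × Int × Int)) (p : List Int) (L : Int) :
    (pvStepCore d p).get? L = pvUpd L (d.get? L) p := by
  unfold pvStepCore pvUpd
  by_cases h : pvFld p 0 = L
  · subst h
    cases hg : d.get? (pvFld p 0) with
    | none => simp [hg, PySem.Dict.get?_insert_self]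
    | some g => rcases g with ⟨a, b, c, e⟩; simp [hg, PySem.Dict.get?_insert_self]
  · cases hg : d.get? (pvFld p 0) with
    | none => simp [hg, PySem.Dict.get?_insert_of_ne _ _ (fun he => h he.symm), h]
    | some g => rcases g with ⟨a, b, c, e⟩; simp [hg, PySem.Dict.get?_insert_of_ne _ _ (fun he => h he.symm), h]

lemma pvCheck_upd (L x y : Int) (g : Option (Int × Int × Int × Int)) (p : List Int) :
    pvCheckVal x y (pvUpd L g p) = (pvMoved L x y p || pvCheckVal x y g) := by
  unfold pvUpd pvMoved
  by_cases h : pvFld p 0 = L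
  · rw [if_pos h]
    cases g with
    | none =>
      simp only [pvCheckVal, h, decide_true, Bool.true_and, Bool.or_false]
      rw [Bool.or_assoc, pvAbsSplit, pvAbsSplit]
    | some g =>
      rcases g with ⟨a, b, c, e⟩
      simp only [pvCheckVal, h, decide_true, Bool.true_and]
      simp only [← Bool.decide_or]
      rw [decide_eq_decide]
      simp only [gt_iff_lt, lt_abs]
      constructor <;> intro h' <;>
        · rcases h' with h' | h' <;> omega
  · rw [if_neg h]
    simp [h]

def pvUpdW (ws : PySem.Set Int) (L : Int) (g : Option (Int × Int × Int × Int)) (p : List Int) : Option (Int × Int × Int × Int) :=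
  if PySem.Set.contains ws (pvFld p 0) then pvUpd L g p else g

lemma pvStepW_get (ws : PySem.Set Int) (d : PySem.Dict Int (Int × Int × Int × Int)) (p : List Int) (L : Int) :
    (pvBStep ws d p).get? L = pvUpdW ws L (d.get? L) p := by
  unfold pvBStep pvUpdW
  by_cases h : PySem.Set.contains ws (pvFld p 0)
  · rw [if_pos h, if_pos h]
    exact pvStep_get d p L
  · rw [if_neg h, if_neg h]

lemma pvBuildW_get (ws : PySem.Set Int) (ps : List (List Int)) (d : PySem.Dict Int (Int × Int × Int × Int)) (L : Int) :
    (ps.foldl (pvBStep ws) d).get? L = ps.foldl (pvUpdW ws L) (d.get? L) := by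
  induction ps generalizing d with
  | nil => rfl
  | cons p ps ih => simp only [List.foldl_cons, ih, pvStepW_get]

lemma pvCheckW_upd (ws : PySem.Set Int) (L x y : Int) (g : Option (Int × Int × Int × Int)) (p : List Int) :
    pvCheckVal x y (pvUpdW ws L g p) = ((PySem.Set.contains ws (pvFld p 0) && pvMoved L x y p) || pvCheckVal x y g) := by
  unfold pvUpdW
  by_cases h : PySem.Set.contains ws (pvFld p 0)
  · rw [if_pos h, h, Bool.true_and, pvCheck_upd]
  · rw [if_neg h, Bool.eq_false_iff.mpr h, Bool.false_and, Bool.false_or]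

lemma pvCheckW_fold (ws : PySem.Set Int) (ps : List (List Int)) (L x y : Int) (g : Option (Int × Int × Int × Int)) :
    pvCheckVal x y (ps.foldl (pvUpdW ws L) g) =
      (ps.any (fun p => PySem.Set.contains ws (pvFld p 0) && pvMoved L x y p) || pvCheckVal x y g) := by
  induction ps generalizing g with
  | nil => simp
  | cons p ps ih =>
    rw [List.foldl_cons, List.any_cons, ih, pvCheckW_upd]
    cases (PySem.Set.contains ws (pvFld p 0) && pvMoved L x y p) <;>
      cases ps.any (fun p => PySem.Set.contains ws (pvFld p 0) && pvMoved L x y p) <;> simp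

lemma pvPointwise (ws : PySem.Set Int) (ps : List (List Int)) (obj : List Int)
    (hL : PySem.Set.contains ws (pvFld obj 0) = true) :
    (ps.any (fun prev_obj =>
      if pvFld obj 0 == pvFld prev_obj 0 then
        let x_diff := |pvFld obj 2 - pvFld prev_obj 2|
        let y_diff := |pvFld obj 3 - pvFld prev_obj 3|
        decide (x_diff > 20) || decide (y_diff > 20)
      else false)) = pvBCheck (ps.foldl (pvBStep ws) PySem.Dict.empty) obj := by
  unfold pvBCheck
  rw [pvBuildW_get ws ps PySem.Dict.empty (pvFld obj 0), PySem.Dict.get?_empty, pvCheckW_fold]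
  have hnone : pvCheckVal (pvFld obj 2) (pvFld obj 3) none = false := rfl
  rw [hnone, Bool.or_false]
  apply congrArg ps.any
  funext p
  unfold pvMoved
  have hmem : pvFld obj 0 ∈ ws := by simpa using hL
  by_cases h0 : pvFld p 0 = pvFld obj 0
  · simp [h0, hmem]
  · have h1 : ¬ pvFld obj 0 = pvFld p 0 := fun he => h0 he.symm
    simp [h0, h1]

-- ===== VERDICT (by name: the statement is the Claim_ definition above) =====
theorem is_object_in_motion_spec : Claim_equal_is_object_in_motion := by
  intro c p _hDom _hPre
  unfold Spec_is_object_in_motion is_object_in_motion is_object_in_motion_alt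
  show _ = c.any (pvBCheck (p.foldl (pvBStep (PySem.Set.ofList (c.map (fun obj => pvFld obj 0)))) PySem.Dict.empty))
  by_cases hp : p = []
  · subst hp
    rw [if_pos rfl, List.foldl_nil]
    clear _hDom _hPre
    have hb : pvBCheck PySem.Dict.empty = fun (_ : List Int) => false :=
      funext fun o => by unfold pvBCheck; rw [PySem.Dict.get?_empty]; rfl
    rw [hb]
    induction c with
    | nil => rfl
    | cons o c ih => rw [List.any_cons, ← ih, Bool.false_or]
  · rw [if_neg hp]
    refine PySem.List.any_congr_mem (fun obj hobj => pvPointwise _ p obj ?_)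
    have hm : pvFld obj 0 ∈ c.map (fun obj => pvFld obj 0) := List.mem_map_of_mem hobj
    simpa [PySem.Set.mem_ofList] using hm
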